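-- pv_equiv track=rewrite | github.com/sever-sever/nftables-cgnat | cgnat_map.py | generate_port_rules
-- ===== SOURCE A (Python) =====
-- def generate_port_rules(
--     external_hosts: list,
--     internal_hosts: list,
--     port_count: int,
--     global_port_range: str = '1024-65535',
-- ) -> list:
--     """Generates list of nftables rules for the batch file."""
--     rules = []
--     proto_map_elements = []
--     other_map_elements = []
--     start_port, end_port = map(int, global_port_range.split('-'))
--     total_possible_ports = (end_port - start_port) + 1
--
--     # Calculate the required number of ports per host
--     required_ports_per_host = port_count
--
--     # Check if there are enough external addresses for all internal hosts
--     if required_ports_per_host * len(internal_hosts) > total_possible_ports * len(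
--         external_hosts
--     ):
--         raise ValueError("Not enough ports available for the specified parameters!")
--
--     current_port = start_port
--     current_external_index = 0
--
--     for internal_host in internal_hosts:
--         external_host = external_hosts[current_external_index]
--         next_end_port = current_port + required_ports_per_host - 1
--
--         # If the port range exceeds the end_port, move to the next external host
--         while next_end_port > end_port:
--             current_external_index = (current_external_index + 1) % len(external_hosts)
--             external_host = external_hosts[current_external_index]
--             current_port = start_port
--             next_end_port = current_port + required_ports_per_host - 1
--
--         # Ensure the same port is not assigned to the same external host
--         if any(
--             rule.endswith(f'{external_host}:{current_port}-{next_end_port}')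
--             for rule in rules
--         ):
--             raise ValueError("Not enough ports available for the specified parameters")
--
--         proto_map_elements.append(f'{internal_host} : {external_host} . {current_port}-{next_end_port}')
--         other_map_elements.append(f'{internal_host} : {external_host}')
--
--         current_port = next_end_port + 1
--         if current_port > end_port:
--             current_port = start_port
--             current_external_index += 1  # Move to the next external host
--
--     return [proto_map_elements, other_map_elements]
-- ===== SOURCE B (Python) =====
-- def generate_port_rules(
--     external_hosts: list,
--     internal_hosts: list,
--     port_count: int,
--     global_port_range: str = '1024-65535',
-- ) -> list:
--     """Generates list of nftables rules for the batch file."""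
--     start_port, end_port = map(int, global_port_range.split('-'))
--     total_possible_ports = (end_port - start_port) + 1
--
--     if port_count * len(internal_hosts) > total_possible_ports * len(external_hosts):
--         raise ValueError("Not enough ports available for the specified parameters!")
--
--     # Closed form: external hosts carry total // port_count whole port blocks each,
--     # cycling back to the first external host when they run out.
--     blocks_per_external = total_possible_ports // port_count
--     proto_map_elements = []
--     other_map_elements = []
--     for i, internal_host in enumerate(internal_hosts):
--         external_host = external_hosts[(i // blocks_per_external) % len(external_hosts)]
--         current = start_port + (i % blocks_per_external) * port_count
--         proto_map_elements.append(
--             f'{internal_host} : {external_host} . {current}-{current + port_count - 1}'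
--         )
--         other_map_elements.append(f'{internal_host} : {external_host}')
--     return [proto_map_elements, other_map_elements]
-- ===== Notes on version B (the rewrite author's own statement) =====
-- stated objective: simpler
-- what changed: Replaces A's carried current_port/current_external_index state with its while-reset and deferred wraparound by a closed-form per-host computation: host i gets external_hosts[(i // (total//port_count)) % len(external_hosts)] and the port window start + (i % blocks)*port_count .. +port_count-1; the always-false any() scan over the never-populated rules list is dropped.
import Mathlib
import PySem

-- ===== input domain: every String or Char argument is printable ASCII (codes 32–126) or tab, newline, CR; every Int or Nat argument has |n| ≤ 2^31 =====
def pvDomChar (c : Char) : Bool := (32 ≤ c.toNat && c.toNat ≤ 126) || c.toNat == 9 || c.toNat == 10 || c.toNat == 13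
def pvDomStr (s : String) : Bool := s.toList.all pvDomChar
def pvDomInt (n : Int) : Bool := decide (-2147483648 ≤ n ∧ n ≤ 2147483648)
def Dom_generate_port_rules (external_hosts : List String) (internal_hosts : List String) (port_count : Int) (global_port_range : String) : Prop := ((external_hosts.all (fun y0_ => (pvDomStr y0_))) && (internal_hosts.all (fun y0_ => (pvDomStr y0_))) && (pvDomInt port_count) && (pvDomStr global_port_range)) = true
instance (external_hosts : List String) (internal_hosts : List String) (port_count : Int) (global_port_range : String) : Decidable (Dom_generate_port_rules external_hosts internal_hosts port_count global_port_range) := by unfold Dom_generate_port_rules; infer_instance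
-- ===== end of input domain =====

-- B replaces A's carried current_port/current_external_index/while-reset state by a closed-form
-- per-index computation (host i -> external (i // blocks) % len, ports start + (i % blocks)*count);
-- objective: simpler. Pre_ excludes only inputs where A raises or loops forever, plus malformed
-- nonpositive port counts (outside the natural domain; B's block division is undefined there).


-- ===== PORT A =====
-- 'start_port, end_port = map(int, global_port_range.split('-'))' — none = ValueError
-- (wrong number of parts or a non-integer part); both Pythons perform this same parse.
def pvParse (gpr : String) : Option (Int × Int) :=
  match PySem.Str.split? gpr "-" with
  | some [a, b] =>
    match PySem.Int.ofStr? a, PySem.Int.ofStr? b with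
    | some s, some e => some (s, e)
    | _, _ => none
  | _ => none

-- One iteration of A's 'for internal_host in internal_hosts' loop over the state
-- (proto_map_elements, other_map_elements, current_port, current_external_index).
-- The inner 'while next_end_port > end_port' is transcribed as one conditional pass:
-- after one pass its condition no longer changes, so either one pass suffices or the
-- Python loops forever (the latter is excluded by Pre_).
def gprStepA (exts : List String) (startp endp pc : Int)
    (st : List String × List String × Int × Int) (h : String) :
    List String × List String × Int × Int :=
  let proto := st.1
  let other := st.2.1
  let cur0 := st.2.2.1
  let idx0 := st.2.2.2
  let cur := if cur0 + pc - 1 > endp then startp else cur0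
  let idx := if cur0 + pc - 1 > endp then PySem.Int.mod (idx0 + 1) exts.length else idx0
  let ext := (PySem.List.pyGet? exts idx).getD ""
  let nextEnd := cur + pc - 1
  -- 'any(rule.endswith(...) for rule in rules)': rules is never appended to, so the scan is over []
  if ([] : List String).any (fun r =>
      PySem.Str.endswith r (ext ++ ":" ++ PySem.Int.toStr cur ++ "-" ++ PySem.Int.toStr nextEnd)) then
    ([], [], 0, 0)  -- raise ValueError (unreachable: any over [] is false)
  else
    let proto := proto ++ [h ++ " : " ++ ext ++ " . " ++ PySem.Int.toStr cur ++ "-" ++ PySem.Int.toStr nextEnd]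
    let other := other ++ [h ++ " : " ++ ext]
    let cur2 := nextEnd + 1
    if cur2 > endp then (proto, other, startp, idx + 1) else (proto, other, cur2, idx)

def generate_port_rules (external_hosts : List String) (internal_hosts : List String) (port_count : Int) (global_port_range : String) : List (List String) :=
  match pvParse global_port_range with
  | none => []  -- ValueError from int()/unpacking (excluded by Pre_)
  | some (startp, endp) =>
    let total := endp - startp + 1
    if port_count * internal_hosts.length > total * external_hosts.length then
      []  -- raise ValueError (excluded by Pre_)
    else
      let st := internal_hosts.foldl (gprStepA external_hosts startp endp port_count) ([], [], startp, 0)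
      [st.1, st.2.1]

-- ===== PORT B =====
-- B's per-host closed form: host i is served by external (i // blocks) % len at ports
-- start + (i % blocks)*count .. +count-1; the loop appends to the two result lists.
def pvAssign (exts : List String) (startp pc bpe : Int) (i : Int) (h : String) : String × String :=
  let ext := (PySem.List.pyGet? exts (PySem.Int.mod (PySem.Int.floordiv i bpe) exts.length)).getD ""
  let cur := startp + PySem.Int.mod i bpe * pc
  (h ++ " : " ++ ext ++ " . " ++ PySem.Int.toStr cur ++ "-" ++ PySem.Int.toStr (cur + pc - 1),
   h ++ " : " ++ ext)

def gprStepB (exts : List String) (startp pc bpe : Int)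
    (st : List String × List String) (q : Int × String) : List String × List String :=
  let a := pvAssign exts startp pc bpe q.1 q.2
  (st.1 ++ [a.1], st.2 ++ [a.2])

def generate_port_rules_alt (external_hosts : List String) (internal_hosts : List String) (port_count : Int) (global_port_range : String) : List (List String) :=
  match pvParse global_port_range with
  | none => []  -- ValueError
  | some (startp, endp) =>
    let total := endp - startp + 1
    if port_count * internal_hosts.length > total * external_hosts.length then
      []  -- raise ValueError
    else
      let bpe := PySem.Int.floordiv total port_count
      let st := (PySem.List.enumerate internal_hosts 0).foldl
        (gprStepB external_hosts startp port_count bpe) ([], [])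
      [st.1, st.2]

-- ===== PRECONDITION & SPEC =====
-- Pre_ excludes: inputs whose range string does not parse (A raises ValueError); inputs failing
-- A's own capacity check (A raises ValueError); port_count > total with internal hosts present
-- (A's inner while loops forever); and nonpositive port_count — malformed input outside the
-- task's natural domain, on which B's block division is a ZeroDivisionError or meaningless.
def pvPreB (external_hosts : List String) (internal_hosts : List String) (port_count : Int) (global_port_range : String) : Bool :=
  match pvParse global_port_range with
  | none => false
  | some (s, e) =>
    decide (1 ≤ port_count) &&
    (decide (internal_hosts = []) || decide (port_count ≤ e - s + 1)) &&
    decide (port_count * internal_hosts.length ≤ (e - s + 1) * external_hosts.length)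

def Pre_generate_port_rules (external_hosts : List String) (internal_hosts : List String) (port_count : Int) (global_port_range : String) : Prop :=
  pvPreB external_hosts internal_hosts port_count global_port_range = true
instance (external_hosts : List String) (internal_hosts : List String) (port_count : Int) (global_port_range : String) : Decidable (Pre_generate_port_rules external_hosts internal_hosts port_count global_port_range) := by unfold Pre_generate_port_rules; infer_instance

def pvWitness_generate_port_rules : List String × List String × Int × String :=
  (["192.0.2.1", "192.0.2.2"], ["10.0.0.1", "10.0.0.2", "10.0.0.3"], 5, "1-10")

def Spec_generate_port_rules (external_hosts : List String) (internal_hosts : List String) (port_count : Int) (global_port_range : String) (out : List (List String)) : Prop := out = generate_port_rules_alt external_hosts internal_hosts port_count global_port_range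
instance (external_hosts : List String) (internal_hosts : List String) (port_count : Int) (global_port_range : String) (out : List (List String)) : Decidable (Spec_generate_port_rules external_hosts internal_hosts port_count global_port_range out) := by unfold Spec_generate_port_rules; infer_instance

-- ===== CLAIM (what is proved, stated in full; the proofs are below) =====
def Claim_equal_generate_port_rules : Prop := ∀ (external_hosts : List String) (internal_hosts : List String) (port_count : Int) (global_port_range : String), Dom_generate_port_rules external_hosts internal_hosts port_count global_port_range → Pre_generate_port_rules external_hosts internal_hosts port_count global_port_range → Spec_generate_port_rules external_hosts internal_hosts port_count global_port_range (generate_port_rules external_hosts internal_hosts port_count global_port_range)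

-- ===== LEMMAS AND PROOFS =====

-- (x % L + 1) % L = (x + 1) % L
theorem pvEmodSucc (x L : Int) : (x % L + 1) % L = (x + 1) % L := by
  conv_rhs => rw [← Int.emod_add_ediv_mul x L]
  have h : x % L + x / L * L + 1 = x % L + 1 + L * (x / L) := by ring
  rw [h, Int.add_mul_emod_self_left]

-- B's foldl over enumerate is the pair of maps of pvAssign.
theorem gprLoopB (exts : List String) (s pc bpe : Int) :
    ∀ (l : List (Int × String)) (p o : List String),
      l.foldl (gprStepB exts s pc bpe) (p, o)
        = (p ++ l.map (fun q => (pvAssign exts s pc bpe q.1 q.2).1),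
           o ++ l.map (fun q => (pvAssign exts s pc bpe q.1 q.2).2)) := by
  intro l
  induction l with
  | nil => intro p o; simp
  | cons q t ih =>
    intro p o
    rw [List.foldl_cons]
    show t.foldl (gprStepB exts s pc bpe) (p ++ [(pvAssign exts s pc bpe q.1 q.2).1], o ++ [(pvAssign exts s pc bpe q.1 q.2).2]) = _
    rw [ih]
    simp

-- Loop invariant for A: after i hosts the state is the closed form
-- (cur = s + (i % bpe)*pc, idx = (i / bpe) [% len when R ≠ 0]), except that when total
-- is not a whole number of blocks (R ≠ 0) the reset at a block boundary is deferred to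
-- the next iteration's while, which also takes the index mod len ("lazy" disjunct).
theorem gprLoopA (exts : List String) (s e pc bpe R : Int)
    (hpc : 1 ≤ pc) (hbe : bpe * pc + R = e - s + 1) (hR0 : 0 ≤ R) (hRlt : R < pc)
    (hbpe : 1 ≤ bpe) (hL : 0 < (exts.length : Int)) :
    ∀ (hs : List String) (i cur idx : Int) (p o : List String), 0 ≤ i →
      (R = 0 → i + hs.length ≤ bpe * exts.length) →
      ((cur = s + i % bpe * pc ∧ idx = (if R = 0 then i / bpe else (i / bpe) % exts.length)) ∨
       (R ≠ 0 ∧ 0 < i ∧ i % bpe = 0 ∧ cur = s + bpe * pc ∧ idx = (i / bpe - 1) % exts.length)) →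
      (hs.foldl (gprStepA exts s e pc) (p, o, cur, idx)).1
          = p ++ (PySem.List.enumerate hs i).map (fun q => (pvAssign exts s pc bpe q.1 q.2).1) ∧
      (hs.foldl (gprStepA exts s e pc) (p, o, cur, idx)).2.1
          = o ++ (PySem.List.enumerate hs i).map (fun q => (pvAssign exts s pc bpe q.1 q.2).2) := by
  intro hs
  induction hs with
  | nil =>
    intro i cur idx p o _ _ _
    simp [PySem.List.enumerate_nil]
  | cons h t ih =>
    intro i cur idx p o hi hlen hinv
    have hbpe0 : (0:Int) < bpe := by omega
    have hq : bpe * (i / bpe) + i % bpe = i := Int.mul_ediv_add_emod i bpe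
    have hr0 : 0 ≤ i % bpe := Int.emod_nonneg i (by omega)
    have hrb : i % bpe < bpe := Int.emod_lt_of_pos i hbpe0
    have hq0 : 0 ≤ i / bpe := Int.ediv_nonneg hi (by omega)
    -- the index after the while pass, uniformly
    set J : Int := if R = 0 then i / bpe else (i / bpe) % exts.length with hJ
    -- the adjusted (current_port, current_external_index) after the while pass
    have hadj :
        (if cur + pc - 1 > e then s else cur) = s + i % bpe * pc ∧
        (if cur + pc - 1 > e then PySem.Int.mod (idx + 1) (exts.length : Int) else idx) = J := by
      rcases hinv with ⟨hc, hx⟩ | ⟨hRne, hipos, hr00, hc, hx⟩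
      · have hmul : (i % bpe + 1) * pc ≤ bpe * pc :=
          mul_le_mul_of_nonneg_right (by omega) (by omega)
        have hcond : ¬ (cur + pc - 1 > e) := by subst hc; nlinarith
        rw [if_neg hcond, if_neg hcond]
        exact ⟨hc, hx⟩
      · have hcond : cur + pc - 1 > e := by subst hc; nlinarith
        rw [if_pos hcond, if_pos hcond]
        constructor
        · rw [hr00]; ring
        · rw [hx, hJ, if_neg hRne, PySem.Int.mod_eq_emod_of_pos hL, pvEmodSucc,
            sub_add_cancel]
    -- J always equals B's (i / bpe) % len: in the R = 0 case i / bpe < len while reading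
    have hJmod : J = (i / bpe) % (exts.length : Int) := by
      rw [hJ]
      split_ifs with hRz
      · have hiub : i < bpe * (exts.length : Int) := by
          have := hlen hRz; push_cast [List.length_cons] at this; omega
        have hqlt : i / bpe < (exts.length : Int) := by
          by_contra hcon
          rw [not_lt] at hcon
          have : bpe * (exts.length : Int) ≤ bpe * (i / bpe) :=
            mul_le_mul_of_nonneg_left hcon (by omega)
          omega
        rw [Int.emod_eq_of_lt hq0 hqlt]
      · rfl
    have hJ0 : 0 ≤ J := by rw [hJmod]; exact Int.emod_nonneg _ (by omega)
    have hJlt : J < (exts.length : Int) := by rw [hJmod]; exact Int.emod_lt_of_pos _ hL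
    -- A's loop body produces exactly B's closed-form pair and re-establishes the invariant
    have key : ∃ cur' idx',
        gprStepA exts s e pc (p, o, cur, idx) h
          = (p ++ [(pvAssign exts s pc bpe i h).1],
             o ++ [(pvAssign exts s pc bpe i h).2], cur', idx') ∧
        ((cur' = s + (i+1) % bpe * pc ∧
            idx' = (if R = 0 then (i+1) / bpe else ((i+1) / bpe) % exts.length)) ∨
         (R ≠ 0 ∧ 0 < i + 1 ∧ (i+1) % bpe = 0 ∧ cur' = s + bpe * pc ∧
          idx' = ((i+1) / bpe - 1) % exts.length)) := by
      have hassign1 : (pvAssign exts s pc bpe i h).1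
          = h ++ " : " ++ ((PySem.List.pyGet? exts J).getD "") ++ " . "
            ++ PySem.Int.toStr (s + i % bpe * pc) ++ "-"
            ++ PySem.Int.toStr (s + i % bpe * pc + pc - 1) := by
        simp [pvAssign, PySem.Int.floordiv_eq_ediv_of_pos hbpe0,
          PySem.Int.mod_eq_emod_of_pos hbpe0, PySem.Int.mod_eq_emod_of_pos hL, hJmod]
      have hassign2 : (pvAssign exts s pc bpe i h).2
          = h ++ " : " ++ ((PySem.List.pyGet? exts J).getD "") := by
        simp [pvAssign, PySem.Int.floordiv_eq_ediv_of_pos hbpe0,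
          PySem.Int.mod_eq_emod_of_pos hL, hJmod]
      by_cases hlt : i % bpe + 1 < bpe
      · -- mid-block: no reset, stay on the same external host
        refine ⟨s + i % bpe * pc + pc - 1 + 1, J, ?_, Or.inl ⟨?_, ?_⟩⟩
        · have hmul : (i % bpe + 1 + 1) * pc ≤ bpe * pc :=
            mul_le_mul_of_nonneg_right (by omega) (by omega)
          have hcond2 : ¬ (s + i % bpe * pc + pc - 1 + 1 > e) := by nlinarith
          simp only [gprStepA, hadj.1, hadj.2, hassign1, hassign2, List.any_nil,
            Bool.false_eq_true, if_false, if_neg hcond2]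
        · have h1 : (i+1) / bpe = i / bpe ∧ (i+1) % bpe = i % bpe + 1 :=
            (Int.ediv_emod_unique hbpe0).mpr ⟨by omega, by omega, by omega⟩
          rw [h1.2]; ring
        · rw [hJ]
          have h1 : (i+1) / bpe = i / bpe :=
            ((Int.ediv_emod_unique (a := i+1) (b := bpe) (q := i / bpe)
              (r := i % bpe + 1) hbpe0).mpr ⟨by omega, by omega, by omega⟩).1
          rw [h1]
      · -- block boundary: i % bpe + 1 = bpe
        have hreq : i % bpe + 1 = bpe := by omega
        have hprod : i % bpe * pc + pc = bpe * pc := by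
          calc i % bpe * pc + pc = (i % bpe + 1) * pc := by ring
            _ = bpe * pc := by rw [hreq]
        have hdist : bpe * (i / bpe + 1) = bpe * (i / bpe) + bpe := by ring
        have h12 : (i+1) / bpe = i / bpe + 1 ∧ (i+1) % bpe = 0 :=
          (Int.ediv_emod_unique hbpe0).mpr
            ⟨by linarith [hq, hreq, hdist], by omega, by omega⟩
        by_cases hR : R = 0
        · -- whole number of blocks: A resets eagerly; closed form at i+1
          refine ⟨s, J + 1, ?_, Or.inl ⟨by rw [h12.2]; ring, ?_⟩⟩
          · have hcond2 : s + i % bpe * pc + pc - 1 + 1 > e := by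
              have : bpe * pc = e - s + 1 := by omega
              linarith [hprod]
            simp only [gprStepA, hadj.1, hadj.2, hassign1, hassign2, List.any_nil,
              Bool.false_eq_true, if_false, if_pos hcond2]
          · rw [hJ, if_pos hR, if_pos hR, h12.1]
        · -- partial last block: A defers the reset to the next iteration (lazy)
          refine ⟨s + i % bpe * pc + pc - 1 + 1, J, ?_,
            Or.inr ⟨hR, by omega, h12.2, by linarith [hprod], ?_⟩⟩
          · have hR1 : 1 ≤ R := lt_of_le_of_ne hR0 (Ne.symm hR)
            have hcond2 : ¬ (s + i % bpe * pc + pc - 1 + 1 > e) := by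
              have : bpe * pc + R = e - s + 1 := hbe
              linarith [hprod, hR1]
            simp only [gprStepA, hadj.1, hadj.2, hassign1, hassign2, List.any_nil,
              Bool.false_eq_true, if_false, if_neg hcond2]
          · rw [hJmod, h12.1]; ring_nf
    obtain ⟨cur', idx', hstep, hinv'⟩ := key
    have hlen' : R = 0 → i + 1 + (t.length : Int) ≤ bpe * (exts.length : Int) := by
      intro hRz
      have := hlen hRz; push_cast [List.length_cons] at this ⊢; omega
    have hrec := ih (i+1) cur' idx' (p ++ [(pvAssign exts s pc bpe i h).1])
      (o ++ [(pvAssign exts s pc bpe i h).2]) (by omega) hlen' hinv'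
    rw [List.foldl_cons, hstep]
    rw [PySem.List.enumerate_cons]
    simp only [List.map_cons]
    constructor
    · rw [hrec.1, List.append_assoc, List.singleton_append]
    · rw [hrec.2, List.append_assoc, List.singleton_append]

-- ===== VERDICT =====
theorem generate_port_rules_spec : Claim_equal_generate_port_rules := by
  unfold Claim_equal_generate_port_rules
  intro exts ints pc gpr _ hpre
  unfold Spec_generate_port_rules
  unfold Pre_generate_port_rules pvPreB at hpre
  cases hP : pvParse gpr with
  | none => rw [hP] at hpre; simp at hpre
  | some se =>
    obtain ⟨s, e⟩ := se
    rw [hP] at hpre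
    simp only [Bool.and_eq_true, Bool.or_eq_true, decide_eq_true_eq] at hpre
    obtain ⟨⟨hpc, hfeas⟩, hcap⟩ := hpre
    have hpc0 : (0:Int) < pc := by omega
    have hcapA : ¬ (pc * (ints.length : Int) > (e - s + 1) * (exts.length : Int)) :=
      not_lt.mpr hcap
    simp only [generate_port_rules, generate_port_rules_alt, hP, if_neg hcapA]
    rw [gprLoopB]
    cases hints : ints with
    | nil => simp [PySem.List.enumerate_nil]
    | cons h t =>
      have hfe : pc ≤ e - s + 1 := by
        rcases hfeas with hnil | hle
        · rw [hints] at hnil; cases hnil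
        · exact hle
      have hone : (1:Int) ≤ (ints.length : Int) := by
        rw [hints]; push_cast [List.length_cons]; omega
      have htot0 : (0:Int) < e - s + 1 := by omega
      have hL : (0:Int) < (exts.length : Int) := by
        by_contra hc
        rw [not_lt] at hc
        have hc0 : (exts.length : Int) = 0 := le_antisymm hc (Int.natCast_nonneg _)
        rw [hc0, mul_zero] at hcap
        nlinarith
      have hbe : (e - s + 1) / pc * pc + (e - s + 1) % pc = e - s + 1 := by
        have := Int.mul_ediv_add_emod (e - s + 1) pc; linarith [this]
      have hR0 : 0 ≤ (e - s + 1) % pc := Int.emod_nonneg _ (by omega)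
      have hRlt : (e - s + 1) % pc < pc := Int.emod_lt_of_pos _ hpc0
      have hbpe : 1 ≤ (e - s + 1) / pc := Int.le_ediv_iff_mul_le hpc0 |>.mpr (by omega)
      have hlenR : (e - s + 1) % pc = 0 →
          (0:Int) + (ints.length : Int) ≤ (e - s + 1) / pc * (exts.length : Int) := by
        intro hRz
        have htoteq : (e - s + 1) / pc * pc = e - s + 1 := by omega
        have h1 : pc * (ints.length : Int) ≤ ((e - s + 1) / pc * pc) * (exts.length : Int) := by
          rw [htoteq]; exact hcap
        have h2 : ((e - s + 1) / pc * pc) * (exts.length : Int)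
            = pc * ((e - s + 1) / pc * (exts.length : Int)) := by ring
        rw [h2] at h1
        have := le_of_mul_le_mul_left h1 hpc0
        omega
      have hloop := gprLoopA exts s e pc ((e - s + 1) / pc) ((e - s + 1) % pc)
        hpc hbe hR0 hRlt hbpe hL ints 0 s 0 [] [] le_rfl hlenR
        (Or.inl ⟨by simp, by split_ifs <;> simp⟩)
      rw [← hints]
      rw [PySem.Int.floordiv_eq_ediv_of_pos hpc0]
      rw [hloop.1, hloop.2]
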